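-- pv_equiv track=rewrite | github.com/pipparichter/frugal | src/files/gbff.py | parse_qualifiers
-- ===== SOURCE A (Python) =====
-- def parse_qualifiers(qualifiers:list, delimiter:str=';'):
--     # Need to account for the fact that a single entry can have multiples of the same qualifier.
--     parsed_qualifiers = dict()
--     for field, value in qualifiers:
--         if (field not in parsed_qualifiers):
--             parsed_qualifiers[field] = value
--         else:
--             value = value.replace(delimiter, ' ')
--             # assert (delimiter not in value), f"GBFFFile.parse_qualifiers: There is already a '{delimiter}' in \"{value}\" for field {field}. Need to use a different delimiter."
--             parsed_qualifiers[field] += delimiter + value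
--     return parsed_qualifiers
-- ===== SOURCE B (Python) =====
-- def parse_qualifiers(qualifiers: list, delimiter: str = ';'):
--     # Staged passes: first collect the distinct fields in order of first
--     # appearance, then for each field gather ALL its values from the whole
--     # list (first kept raw, later ones with the delimiter replaced) and join.
--     fields = []
--     for field, _ in qualifiers:
--         if field not in fields:
--             fields.append(field)
--     result = {}
--     for field in fields:
--         values = [v for f, v in qualifiers if f == field]
--         pieces = values[:1] + [v.replace(delimiter, ' ') for v in values[1:]]
--         result[field] = delimiter.join(pieces)
--     return result
-- ===== Notes on version B (the rewrite author's own statement) =====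
-- stated objective: alternative
-- what changed: Instead of A's single pass building a dict with in-place '+=' string concatenation, B runs staged passes: it first collects the distinct fields in first-appearance order, then for each field re-scans the qualifier list to gather its values and joins them once (first raw, later ones with the delimiter replaced).
import Mathlib
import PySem

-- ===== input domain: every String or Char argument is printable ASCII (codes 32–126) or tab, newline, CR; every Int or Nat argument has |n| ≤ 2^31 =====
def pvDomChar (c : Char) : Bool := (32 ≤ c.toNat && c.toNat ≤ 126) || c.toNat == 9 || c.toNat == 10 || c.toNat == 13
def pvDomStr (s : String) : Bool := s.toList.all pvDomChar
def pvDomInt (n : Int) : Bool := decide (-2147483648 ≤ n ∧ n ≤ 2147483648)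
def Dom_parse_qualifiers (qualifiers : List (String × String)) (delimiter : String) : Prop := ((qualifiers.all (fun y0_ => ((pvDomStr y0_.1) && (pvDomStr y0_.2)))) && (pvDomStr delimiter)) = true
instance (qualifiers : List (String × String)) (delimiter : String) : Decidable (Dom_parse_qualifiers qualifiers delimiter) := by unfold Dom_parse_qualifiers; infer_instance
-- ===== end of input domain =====

-- B replaces A's single-pass dict with '+=' concatenation by staged passes (distinct fields
-- first, then a full re-scan per field with one join); return values agree on all inputs.


-- ===== PORT A =====
def parse_qualifiers (qualifiers : List (String × String)) (delimiter : String) : List (String × String) :=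
  (qualifiers.foldl
    (fun parsed fv =>
      if parsed.contains fv.1 = false then
        parsed.insert fv.1 fv.2
      else
        parsed.insert fv.1 (parsed.getD fv.1 "" ++ (delimiter ++ PySem.Str.replace fv.2 delimiter " ")))
    (PySem.Dict.empty : PySem.Dict String String)).items

-- ===== PORT B =====
def parse_qualifiers_alt (qualifiers : List (String × String)) (delimiter : String) : List (String × String) :=
  let fields := qualifiers.foldl (fun seen fv => if seen.contains fv.1 then seen else seen ++ [fv.1]) []
  fields.map (fun field =>
    let values := (qualifiers.filter (fun p => p.1 == field)).map Prod.snd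
    let pieces := values.take 1 ++ (values.drop 1).map (fun v => PySem.Str.replace v delimiter " ")
    (field, PySem.Str.join delimiter pieces))

-- ===== PRECONDITION & SPEC =====
def Spec_parse_qualifiers (qualifiers : List (String × String)) (delimiter : String) (out : List (String × String)) : Prop := out = parse_qualifiers_alt qualifiers delimiter
instance (qualifiers : List (String × String)) (delimiter : String) (out : List (String × String)) : Decidable (Spec_parse_qualifiers qualifiers delimiter out) := by unfold Spec_parse_qualifiers; infer_instance

-- ===== CLAIM (what is proved, stated in full; the proofs are below) =====
def Claim_equal_parse_qualifiers : Prop := ∀ (qualifiers : List (String × String)) (delimiter : String), Dom_parse_qualifiers qualifiers delimiter → Spec_parse_qualifiers qualifiers delimiter (parse_qualifiers qualifiers delimiter)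

-- ===== LEMMAS AND PROOFS =====

-- Proof-side names for the pieces of B's computation.
def pvFields (qs : List (String × String)) : List String :=
  qs.foldl (fun seen fv => if seen.contains fv.1 then seen else seen ++ [fv.1]) []

def pvGroup (qs : List (String × String)) (f : String) : List String :=
  (qs.filter (fun p => p.1 == f)).map Prod.snd

def pvTrans (delim : String) (l : List String) : List String :=
  l.take 1 ++ (l.drop 1).map (fun v => PySem.Str.replace v delim " ")

def pvVal (qs : List (String × String)) (delim : String) (f : String) : String :=
  PySem.Str.join delim (pvTrans delim (pvGroup qs f))

theorem pv_alt_eq (qs : List (String × String)) (delim : String) :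
    parse_qualifiers_alt qs delim = (pvFields qs).map (fun f => (f, pvVal qs delim f)) := rfl

-- `Str.join` over a one-element list is that element.
theorem pv_join_single (sep v : String) : PySem.Str.join sep [v] = v := by
  rw [← String.toList_inj, PySem.Str.toList_join]
  simp [PySem.Chars.join_singleton]

theorem pv_chars_join_append (sep r : List Char) (l : List (List Char)) (h : l ≠ []) :
    PySem.Chars.join sep (l ++ [r]) = PySem.Chars.join sep l ++ sep ++ r := by
  induction l with
  | nil => exact absurd rfl h
  | cons x xs ih =>
    cases xs with
    | nil => simp [PySem.Chars.join_cons_cons, PySem.Chars.join_singleton]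
    | cons y ys =>
      have hx : (x :: y :: ys) ++ [r] = x :: (y :: (ys ++ [r])) := by simp
      have ih' : PySem.Chars.join sep (y :: (ys ++ [r]))
          = PySem.Chars.join sep (y :: ys) ++ sep ++ r := by
        simpa using ih (by simp)
      rw [hx, PySem.Chars.join_cons_cons sep x y (ys ++ [r]), ih',
        PySem.Chars.join_cons_cons]
      simp [List.append_assoc]

theorem pv_join_append (sep r : String) (l : List String) (h : l ≠ []) :
    PySem.Str.join sep (l ++ [r]) = PySem.Str.join sep l ++ (sep ++ r) := by
  rw [← String.toList_inj]
  simp only [PySem.Str.toList_join, String.toList_append, List.map_append, List.map_cons,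
    List.map_nil]
  rw [pv_chars_join_append _ _ _ (by simpa using h)]
  simp [List.append_assoc]

theorem pvFields_append (qs : List (String × String)) (fv : String × String) :
    pvFields (qs ++ [fv])
      = if (pvFields qs).contains fv.1 then pvFields qs else pvFields qs ++ [fv.1] := by
  simp [pvFields, List.foldl_append]

theorem mem_pvFields (qs : List (String × String)) (f : String) :
    f ∈ pvFields qs ↔ ∃ p ∈ qs, p.1 = f := by
  induction qs using List.reverseRecOn generalizing f with
  | nil => simp [pvFields]
  | append_singleton l fv ih =>
    rw [pvFields_append]
    by_cases h : fv.1 ∈ pvFields l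
    · rw [if_pos (by simpa using h), ih f]
      constructor
      · rintro ⟨p, hp, hpe⟩; exact ⟨p, by simp [hp], hpe⟩
      · rintro ⟨p, hp, hpe⟩
        rcases (by simpa using hp : p ∈ l ∨ p = fv) with h1 | h1
        · exact ⟨p, h1, hpe⟩
        · obtain ⟨q, hq, hqe⟩ := (ih fv.1).mp h
          exact ⟨q, hq, by rw [hqe, ← hpe, h1]⟩
    · rw [if_neg (by simpa using h)]
      simp only [List.mem_append, List.mem_singleton, ih f]
      constructor
      · rintro (⟨p, hp, hpe⟩ | he)
        · exact ⟨p, by simp [hp], hpe⟩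
        · exact ⟨fv, by simp, he.symm⟩
      · rintro ⟨p, hp, hpe⟩
        rcases (by simpa using hp : p ∈ l ∨ p = fv) with h1 | h1
        · exact Or.inl ⟨p, h1, hpe⟩
        · subst h1; exact Or.inr hpe.symm

theorem nodup_pvFields (qs : List (String × String)) : (pvFields qs).Nodup := by
  induction qs using List.reverseRecOn with
  | nil => simp [pvFields]
  | append_singleton l fv ih =>
    rw [pvFields_append]
    by_cases h : fv.1 ∈ pvFields l
    · rw [if_pos (by simpa using h)]; exact ih
    · rw [if_neg (by simpa using h)]
      refine List.Nodup.append ih (List.nodup_singleton _) ?_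
      intro a ha hb
      rw [List.mem_singleton] at hb
      subst hb
      exact h ha

theorem pvGroup_append (qs : List (String × String)) (fv : String × String) (f : String) :
    pvGroup (qs ++ [fv]) f = pvGroup qs f ++ (if fv.1 = f then [fv.2] else []) := by
  simp only [pvGroup, List.filter_append, List.map_append]
  congr 1
  by_cases h : fv.1 = f <;> simp [h]

theorem pvGroup_ne_nil (qs : List (String × String)) (f : String) :
    pvGroup qs f ≠ [] ↔ ∃ p ∈ qs, p.1 = f := by
  simp only [pvGroup, ne_eq, List.map_eq_nil_iff, List.filter_eq_nil_iff]
  push Not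
  constructor
  · rintro ⟨p, hp, hpe⟩
    exact ⟨p, hp, by simpa using hpe⟩
  · rintro ⟨p, hp, hpe⟩
    exact ⟨p, hp, by simpa using hpe⟩

theorem pvTrans_append (delim : String) (l : List String) (x : String) (h : l ≠ []) :
    pvTrans delim (l ++ [x]) = pvTrans delim l ++ [PySem.Str.replace x delim " "] := by
  cases l with
  | nil => exact absurd rfl h
  | cons v rest => simp [pvTrans]

theorem pvTrans_ne_nil (delim : String) (l : List String) (h : l ≠ []) :
    pvTrans delim l ≠ [] := by
  cases l with
  | nil => exact absurd rfl h
  | cons v rest => simp [pvTrans]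

-- The fold in A's port produces exactly B's field/value pairs.
theorem pv_foldA (delim : String) (qs : List (String × String)) :
    (qs.foldl
      (fun parsed fv =>
        if parsed.contains fv.1 = false then
          parsed.insert fv.1 fv.2
        else
          parsed.insert fv.1 (parsed.getD fv.1 "" ++ (delim ++ PySem.Str.replace fv.2 delim " ")))
      (PySem.Dict.empty : PySem.Dict String String)).items
    = (pvFields qs).map (fun f => (f, pvVal qs delim f)) := by
  induction qs using List.reverseRecOn with
  | nil => simp only [List.foldl_nil]; rfl
  | append_singleton l fv ih =>
    rw [List.foldl_append]
    set dA := (l.foldl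
      (fun parsed fv =>
        if parsed.contains fv.1 = false then
          parsed.insert fv.1 fv.2
        else
          parsed.insert fv.1 (parsed.getD fv.1 "" ++ (delim ++ PySem.Str.replace fv.2 delim " ")))
      (PySem.Dict.empty : PySem.Dict String String)) with hdA
    have hkeys : dA.keys = pvFields l := by
      simp only [PySem.Dict.keys, ih, List.map_map]
      exact List.map_id _
    have hnodup : dA.keys.Nodup := by rw [hkeys]; exact nodup_pvFields l
    have hcont : dA.contains fv.1 = decide (fv.1 ∈ pvFields l) := by
      rw [PySem.Dict.contains_eq_decide_mem_keys, hkeys]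
    simp only [List.foldl_cons, List.foldl_nil]
    by_cases hmem : fv.1 ∈ pvFields l
    · -- fv.1 already seen: A takes the '+=' branch.
      have hc : dA.contains fv.1 = true := by rw [hcont]; simpa using hmem
      rw [if_neg (by simp [hc])]
      have hgrp : pvGroup l fv.1 ≠ [] :=
        (pvGroup_ne_nil l fv.1).mpr ((mem_pvFields l fv.1).mp hmem)
      have hmemItems : (fv.1, pvVal l delim fv.1) ∈ dA.items := by
        rw [ih]; exact List.mem_map.mpr ⟨fv.1, hmem, rfl⟩
      have hgetD : dA.getD fv.1 "" = pvVal l delim fv.1 :=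
        PySem.Dict.getD_of_mem_items dA hmemItems hnodup ""
      rw [PySem.Dict.items_insert_of_contains dA _ hc, ih, pvFields_append,
        if_pos (by simpa using hmem), List.map_map]
      apply List.map_congr_left
      intro f hf
      by_cases hfe : f = fv.1
      · subst hfe
        simp only [Function.comp, beq_self_eq_true, if_pos, hgetD]
        have : pvVal (l ++ [fv]) delim fv.1
            = pvVal l delim fv.1 ++ (delim ++ PySem.Str.replace fv.2 delim " ") := by
          unfold pvVal
          rw [pvGroup_append, if_pos rfl, pvTrans_append delim _ _ hgrp,
            pv_join_append delim _ _ (pvTrans_ne_nil delim _ hgrp)]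
        rw [this]
      · have hne : (f == fv.1) = false := by simpa using hfe
        simp only [Function.comp, hne, if_false, Bool.false_eq_true]
        have : pvVal (l ++ [fv]) delim f = pvVal l delim f := by
          unfold pvVal
          rw [pvGroup_append, if_neg (fun h => hfe h.symm), List.append_nil]
        rw [this]
    · -- fresh field: A inserts the raw value; B's fields list grows by fv.1.
      have hc : dA.contains fv.1 = false := by rw [hcont]; simpa using hmem
      rw [if_pos (by simp [hc])]
      have hgrp : pvGroup l fv.1 = [] := by
        by_contra h
        exact hmem ((mem_pvFields l fv.1).mpr ((pvGroup_ne_nil l fv.1).mp h))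
      rw [PySem.Dict.items_insert_of_not_contains dA _ hc, ih, pvFields_append,
        if_neg (by simpa using hmem), List.map_append]
      congr 1
      · apply List.map_congr_left
        intro f hf
        have hfe : f ≠ fv.1 := fun h => hmem (h ▸ hf)
        have : pvVal (l ++ [fv]) delim f = pvVal l delim f := by
          unfold pvVal
          rw [pvGroup_append, if_neg (fun h => hfe h.symm), List.append_nil]
        rw [this]
      · have : pvVal (l ++ [fv]) delim fv.1 = fv.2 := by
          unfold pvVal
          rw [pvGroup_append, if_pos rfl, hgrp, List.nil_append]
          simpa [pvTrans] using pv_join_single delim fv.2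
        simp [this]

-- ===== VERDICT (by name: the statement is the Claim_ definition above) =====
theorem parse_qualifiers_spec : Claim_equal_parse_qualifiers := by
  intro qualifiers delimiter _
  unfold Spec_parse_qualifiers parse_qualifiers
  rw [pv_alt_eq, pv_foldA]
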